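-- pv_equiv track=rewrite | github.com/jweezy24/Fuzzy_vault | src/tests/hamming_distance_alg.py | mat_mult_decoding
-- ===== SOURCE A (Python) =====
-- def mat_mult_decoding(a,b):
--     ret = []
--     iter = 0
--     for iter in range(0,3):
--         row = []
--         for i in range(0, len(b)):
--             row.append(b[i][iter])
--         sum = 0
--         for j in range(0,len(row)):
--             sum += (int(a[j]) * int(row[j]))
--         ret.append(str(sum%2))
--     return ret
-- ===== SOURCE B (Python) =====
-- def mat_mult_decoding(a, b):
--     # Single pass over the rows with three running column sums, instead of
--     # three separate column-extraction + dot-product passes.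
--     s0 = s1 = s2 = 0
--     for ai, row in zip(a, b):
--         s0 += ai * row[0]
--         s1 += ai * row[1]
--         s2 += ai * row[2]
--     return [str(s0 % 2), str(s1 % 2), str(s2 % 2)]
-- ===== Notes on version B (the rewrite author's own statement) =====
-- stated objective: alternative
-- what changed: Replaces A's three per-column passes (each extracting a column list of b and then dotting it with a) by one pass over zip(a,b) that maintains three running column sums.
import Mathlib
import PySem

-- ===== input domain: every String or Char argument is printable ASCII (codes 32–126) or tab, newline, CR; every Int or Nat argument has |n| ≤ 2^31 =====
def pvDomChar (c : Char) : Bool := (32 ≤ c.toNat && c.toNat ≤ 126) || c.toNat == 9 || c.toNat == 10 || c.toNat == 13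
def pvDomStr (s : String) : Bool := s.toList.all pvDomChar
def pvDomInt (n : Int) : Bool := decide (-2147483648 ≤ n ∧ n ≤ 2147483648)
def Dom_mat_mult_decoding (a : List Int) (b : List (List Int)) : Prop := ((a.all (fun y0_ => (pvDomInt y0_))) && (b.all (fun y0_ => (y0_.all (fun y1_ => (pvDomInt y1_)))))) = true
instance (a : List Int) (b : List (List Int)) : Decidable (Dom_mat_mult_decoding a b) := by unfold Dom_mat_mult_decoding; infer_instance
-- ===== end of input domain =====

-- B replaces A's three column-extraction + dot-product passes over b by a single
-- pass over zip(a, b) maintaining three running column sums (objective: alternative).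

-- ===== PORT A =====
def mat_mult_decoding (a : List Int) (b : List (List Int)) : List String :=
  (PySem.List.pyRange 0 3).foldl (fun ret iter =>
    let row := (PySem.List.pyRange 0 (PySem.List.len b)).foldl
        (fun row i => row ++ [PySem.List.pyGetD (PySem.List.pyGetD b i []) iter 0]) []
    let sum := (PySem.List.pyRange 0 (PySem.List.len row)).foldl
        (fun sum j => sum + PySem.List.pyGetD a j 0 * PySem.List.pyGetD row j 0) 0
    ret ++ [PySem.Int.toStr (PySem.Int.mod sum 2)]) []

-- ===== PORT B =====
def mat_mult_decoding_alt (a : List Int) (b : List (List Int)) : List String :=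
  let s := (a.zip b).foldl
    (fun (s : Int × Int × Int) p =>
      (s.1 + p.1 * PySem.List.pyGetD p.2 0 0,
       s.2.1 + p.1 * PySem.List.pyGetD p.2 1 0,
       s.2.2 + p.1 * PySem.List.pyGetD p.2 2 0))
    (0, 0, 0)
  [PySem.Int.toStr (PySem.Int.mod s.1 2),
   PySem.Int.toStr (PySem.Int.mod s.2.1 2),
   PySem.Int.toStr (PySem.Int.mod s.2.2 2)]

-- ===== PRECONDITION & SPEC =====
-- A raises IndexError iff some row of b has fewer than 3 entries (columns 0..2 are read)
-- or a is shorter than b (a[j] is read for every j < len(b)); Pre_ excludes exactly those.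
def Pre_mat_mult_decoding (a : List Int) (b : List (List Int)) : Prop :=
  b.length ≤ a.length ∧ ∀ r ∈ b, 3 ≤ r.length
instance (a : List Int) (b : List (List Int)) : Decidable (Pre_mat_mult_decoding a b) := by
  unfold Pre_mat_mult_decoding; infer_instance
def pvWitness_mat_mult_decoding : List Int × List (List Int) := ([1, 2], [[1, 0, 1], [0, 1, 1]])
def Spec_mat_mult_decoding (a : List Int) (b : List (List Int)) (out : List String) : Prop := out = mat_mult_decoding_alt a b
instance (a : List Int) (b : List (List Int)) (out : List String) : Decidable (Spec_mat_mult_decoding a b out) := by unfold Spec_mat_mult_decoding; infer_instance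

-- ===== CLAIM (what is proved, stated in full; the proofs are below) =====
def Claim_equal_mat_mult_decoding : Prop := ∀ (a : List Int) (b : List (List Int)), Dom_mat_mult_decoding a b → Pre_mat_mult_decoding a b → Spec_mat_mult_decoding a b (mat_mult_decoding a b)

-- ===== LEMMAS AND PROOFS =====

-- the dot product of a with column c of b, as B accumulates it
def pvColSum (a : List Int) (b : List (List Int)) (c : Int) : Int :=
  ((a.zip b).map (fun p => p.1 * PySem.List.pyGetD p.2 c 0)).sum

-- B's triple fold computes the three column sums componentwise
theorem pv_triple_fold (l : List (Int × List Int)) (s : Int × Int × Int) :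
    l.foldl (fun (s : Int × Int × Int) p =>
      (s.1 + p.1 * PySem.List.pyGetD p.2 0 0,
       s.2.1 + p.1 * PySem.List.pyGetD p.2 1 0,
       s.2.2 + p.1 * PySem.List.pyGetD p.2 2 0)) s
    = (s.1 + (l.map (fun p => p.1 * PySem.List.pyGetD p.2 0 0)).sum,
       s.2.1 + (l.map (fun p => p.1 * PySem.List.pyGetD p.2 1 0)).sum,
       s.2.2 + (l.map (fun p => p.1 * PySem.List.pyGetD p.2 2 0)).sum) := by
  induction l generalizing s with
  | nil => simp
  | cons p t ih => simp [ih]; ring_nf; simp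

-- index-based dot product over range equals the zip form (u at least as long as v)
theorem pv_dot_zip (u v : List Int) (h : v.length ≤ u.length) :
    ((List.range v.length).map (fun j => u.getD j 0 * v.getD j 0)).sum
    = ((u.zip v).map (fun p => p.1 * p.2)).sum := by
  induction v generalizing u with
  | nil => simp
  | cons x t ih =>
    cases u with
    | nil => simp at h
    | cons y w =>
      simp only [List.length_cons, List.range_succ_eq_map, List.map_cons, List.map_map,
        List.zip_cons_cons, List.sum_cons]
      simp only [List.getD_cons_zero, Function.comp_def]
      congr 1
      simpa using ih w (by simpa using h)

-- A's per-column computation (extract column c, then dot with a) equals pvColSum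
theorem pv_colA (a : List Int) (b : List (List Int)) (c : Int)
    (h : b.length ≤ a.length) :
    (PySem.List.pyRange 0 (PySem.List.len
        ((PySem.List.pyRange 0 (PySem.List.len b)).foldl
          (fun row i => row ++ [PySem.List.pyGetD (PySem.List.pyGetD b i []) c 0]) []))).foldl
      (fun sum j => sum + PySem.List.pyGetD a j 0 *
        PySem.List.pyGetD ((PySem.List.pyRange 0 (PySem.List.len b)).foldl
          (fun row i => row ++ [PySem.List.pyGetD (PySem.List.pyGetD b i []) c 0]) []) j 0) 0
    = pvColSum a b c := by
  have hrow : (PySem.List.pyRange 0 (PySem.List.len b)).foldl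
      (fun row i => row ++ [PySem.List.pyGetD (PySem.List.pyGetD b i []) c 0]) ([] : List Int)
      = b.map (fun r => PySem.List.pyGetD r c 0) := by
    rw [PySem.List.foldl_pyRange_zero_pyGetD b []
      (fun row x => row ++ [PySem.List.pyGetD x c 0]) []]
    simpa using PySem.List.foldl_append_singleton_eq_map
      (fun r => PySem.List.pyGetD r c 0) b []
  rw [hrow]
  rw [PySem.List.foldl_add]
  rw [PySem.List.len_eq, PySem.List.pyRange_zero_nat]
  simp only [List.map_map, Function.comp_def, PySem.List.pyGetD_natCast]
  have hd := pv_dot_zip a (b.map (fun r => PySem.List.pyGetD r c 0)) (by simpa using h)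
  rw [hd]
  simp [pvColSum, List.zip_map_right, Function.comp_def, Prod.map]

-- ===== VERDICT (by name: the statement is the Claim_ definition above) =====
theorem mat_mult_decoding_spec : Claim_equal_mat_mult_decoding := by
  intro a b _ hpre
  unfold Spec_mat_mult_decoding mat_mult_decoding mat_mult_decoding_alt
  obtain ⟨hlen, _⟩ := hpre
  show List.foldl _ [] (PySem.List.pyRange 0 3) = _
  rw [show PySem.List.pyRange 0 3 = [0, 1, 2] from rfl]
  simp only [List.foldl_cons, List.foldl_nil, List.nil_append]
  rw [pv_colA a b 0 hlen, pv_colA a b 1 hlen, pv_colA a b 2 hlen,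
    pv_triple_fold (a.zip b) (0, 0, 0)]
  simp [pvColSum]
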